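-- pv_equiv track=rewrite | github.com/fuchsde/Advent_Of_Code_2020 | Day_6/Script.py | check_sum_same_group_answer
-- ===== SOURCE A (Python) =====
-- def check_sum_same_group_answer(group_answers, group_members):
--     sum_same_group_answers = 0
--     for i in range(0, len(group_answers)):
--         tested_characters = ""
--         for character in group_answers[i]:
--             if group_answers[i].count(character) == group_members[i] and character not in tested_characters:
--                 sum_same_group_answers = sum_same_group_answers + 1
--                 tested_characters = tested_characters + character
--     return sum_same_group_answers
-- ===== SOURCE B (Python) =====
-- def check_sum_same_group_answer(group_answers, group_members):
--     # One frequency-dict pass per group instead of per-character .count scans + manual dedup string.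
--     total = 0
--     for i, answers in enumerate(group_answers):
--         counts = {}
--         for c in answers:
--             counts[c] = counts.get(c, 0) + 1
--         for v in counts.values():
--             if v == group_members[i]:
--                 total += 1
--     return total
-- ===== Notes on version B (the rewrite author's own statement) =====
-- stated objective: alternative
-- what changed: B builds a character-frequency dict per group in one pass and counts values equal to the group size, replacing A's per-character string .count scans and manual tested-characters dedup string.
import Mathlib
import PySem

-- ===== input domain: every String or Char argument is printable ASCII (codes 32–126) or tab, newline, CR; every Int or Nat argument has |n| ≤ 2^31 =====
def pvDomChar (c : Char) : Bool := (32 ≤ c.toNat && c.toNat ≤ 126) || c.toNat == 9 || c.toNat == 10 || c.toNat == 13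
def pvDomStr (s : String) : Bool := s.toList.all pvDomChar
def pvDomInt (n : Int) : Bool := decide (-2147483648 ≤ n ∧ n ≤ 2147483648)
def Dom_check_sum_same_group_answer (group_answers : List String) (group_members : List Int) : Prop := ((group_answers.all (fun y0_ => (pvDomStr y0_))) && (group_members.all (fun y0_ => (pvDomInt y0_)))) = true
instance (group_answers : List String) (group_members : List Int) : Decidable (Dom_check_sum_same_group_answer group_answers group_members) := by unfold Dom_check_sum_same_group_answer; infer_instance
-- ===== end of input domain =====

-- B replaces A's per-character string .count scans and manual tested-characters dedup string
-- by one frequency-dict pass per group; return value only (no argument is mutated by either).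

-- ===== PORT A =====
-- An out-of-range group_members[i] (Python IndexError, reached only when group_answers[i] is
-- non-empty) is read here as the default 0; exactly those inputs are excluded by Pre_ below.
def check_sum_same_group_answer (group_answers : List String) (group_members : List Int) : Int :=
  (PySem.List.pyRange 0 (PySem.List.len group_answers)).foldl
    (fun sum_same_group_answers i =>
      let s := (PySem.List.pyGetD group_answers i "").toList
      (s.foldl
        (fun (st : Int × List Char) character =>
          if ((PySem.Chars.count s [character] : Int) = PySem.List.pyGetD group_members i 0)
              ∧ character ∉ st.2
          then (st.1 + 1, st.2 ++ [character]) else st)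
        (sum_same_group_answers, ([] : List Char))).1)
    0

-- ===== PORT B =====
def check_sum_same_group_answer_alt (group_answers : List String) (group_members : List Int) : Int :=
  (PySem.List.enumerate group_answers).foldl
    (fun total p =>
      let counts := PySem.Dict.counter p.2.toList
      counts.values.foldl
        (fun t v => if v = PySem.List.pyGetD group_members p.1 0 then t + 1 else t)
        total)
    0

-- ===== PRECONDITION & SPEC =====
-- Pre_ excludes exactly the inputs where Python A raises IndexError: a non-empty
-- group_answers[i] whose index i has no counterpart in group_members.
def Pre_check_sum_same_group_answer (group_answers : List String) (group_members : List Int) : Prop :=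
  ∀ i : Nat, i < group_answers.length → group_answers.getD i "" ≠ "" → i < group_members.length
instance (group_answers : List String) (group_members : List Int) : Decidable (Pre_check_sum_same_group_answer group_answers group_members) := by unfold Pre_check_sum_same_group_answer; infer_instance
def pvWitness_check_sum_same_group_answer : List String × List Int := (["ab", "a"], [2, 1])

def Spec_check_sum_same_group_answer (group_answers : List String) (group_members : List Int) (out : Int) : Prop := out = check_sum_same_group_answer_alt group_answers group_members
instance (group_answers : List String) (group_members : List Int) (out : Int) : Decidable (Spec_check_sum_same_group_answer group_answers group_members out) := by unfold Spec_check_sum_same_group_answer; infer_instance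

-- ===== CLAIM (what is proved, stated in full; the proofs are below) =====
def Claim_equal_check_sum_same_group_answer : Prop := ∀ (group_answers : List String) (group_members : List Int), Dom_check_sum_same_group_answer group_answers group_members → Pre_check_sum_same_group_answer group_answers group_members → Spec_check_sum_same_group_answer group_answers group_members (check_sum_same_group_answer group_answers group_members)

-- ===== LEMMAS AND PROOFS =====

-- str.count of a single character needle is the plain character count.
lemma count_go_single (c : Char) :
    ∀ (s : List Char) (fuel acc : Nat), s.length ≤ fuel →
      PySem.Chars.count.go [c] fuel s acc = acc + List.count c s := by
  intro s
  induction s with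
  | nil => intro fuel acc _; cases fuel <;> simp [PySem.Chars.count.go]
  | cons h t ih =>
    intro fuel acc hle
    cases fuel with
    | zero => simp at hle
    | succ n =>
      have hn : t.length ≤ n := by simpa using hle
      have hgo : PySem.Chars.count.go [c] (n + 1) (h :: t) acc
          = if c = h then PySem.Chars.count.go [c] n t (acc + 1)
            else PySem.Chars.count.go [c] n t acc := by
        simp [PySem.Chars.count.go, List.isPrefixOf]
      rw [hgo]
      by_cases hch : c = h
      · rw [if_pos hch, ih n (acc + 1) hn, List.count_cons]
        simp [hch]
        omega
      · rw [if_neg hch, ih n acc hn, List.count_cons]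
        have hfalse : (h == c) = false := by simp [Ne.symm hch]
        simp [hfalse]

lemma chars_count_single (s : List Char) (c : Char) :
    PySem.Chars.count s [c] = List.count c s := by
  simpa [PySem.Chars.count] using count_go_single c s s.length 0 le_rfl

-- A's inner loop counts the distinct characters of t (first occurrences) that satisfy the
-- count condition and are not in the already-tested accumulator.
lemma A_inner (s : List Char) (m : Int) :
    ∀ (t : List Char) (a : Int) (tested : List Char),
      (t.foldl
        (fun (st : Int × List Char) c =>
          if ((PySem.Chars.count s [c] : Int) = m) ∧ c ∉ st.2
          then (st.1 + 1, st.2 ++ [c]) else st)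
        (a, tested)).1
      = a + (List.countP
          (fun c => decide ((PySem.Chars.count s [c] : Int) = m) && !(tested.contains c))
          (PySem.Set.ofList t) : Int) := by
  intro t
  induction t with
  | nil => intro a tested; simp [PySem.Set.ofList_nil]
  | cons c t ih =>
    intro a tested
    rw [List.foldl_cons, PySem.Set.ofList_cons]
    by_cases h : ((PySem.Chars.count s [c] : Int) = m) ∧ c ∉ tested
    · rw [if_pos h, ih]
      have hc : (decide ((PySem.Chars.count s [c] : Int) = m) && !(tested.contains c)) = true := by
        simp [h.1, h.2]
      have hfil : List.countP
            (fun y => decide ((PySem.Chars.count s [y] : Int) = m) && !((tested ++ [c]).contains y))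
            (PySem.Set.ofList t)
          = List.countP
            (fun y => decide ((PySem.Chars.count s [y] : Int) = m) && !(tested.contains y))
            ((PySem.Set.ofList t).discard c) := by
        simp only [PySem.Set.discard, List.countP_filter]
        apply List.countP_congr
        intro y _
        by_cases hyc : y = c
        · subst hyc; simp [h.2]
        · simp [hyc]
      rw [List.countP_cons, hc, hfil, if_pos rfl]
      push_cast
      omega
    · rw [if_neg h, ih]
      have hc : (decide ((PySem.Chars.count s [c] : Int) = m) && !(tested.contains c)) = false := by
        by_cases hp : ((PySem.Chars.count s [c] : Int) = m)
        · have hmem : c ∈ tested := by tauto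
          simp [hmem]
        · simp [hp]
      have hfil : List.countP
            (fun y => decide ((PySem.Chars.count s [y] : Int) = m) && !(tested.contains y))
            ((PySem.Set.ofList t).discard c)
          = List.countP
            (fun y => decide ((PySem.Chars.count s [y] : Int) = m) && !(tested.contains y))
            (PySem.Set.ofList t) := by
        simp only [PySem.Set.discard, List.countP_filter]
        apply List.countP_congr
        intro y _
        by_cases hyc : y = c
        · subst hyc; simp_all
        · simp [hyc]
      rw [List.countP_cons, hc, hfil]
      simp

-- per-group equality: A's scan with the tested accumulator = B's frequency-dict value count
lemma group_eq (s : List Char) (m a : Int) :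
    (s.foldl
      (fun (st : Int × List Char) c =>
        if ((PySem.Chars.count s [c] : Int) = m) ∧ c ∉ st.2
        then (st.1 + 1, st.2 ++ [c]) else st)
      (a, ([] : List Char))).1
    = (PySem.Dict.counter s).values.foldl (fun t v => if v = m then t + 1 else t) a := by
  rw [A_inner s m s a [], PySem.List.foldl_ite_add_one (fun v => v = m)]
  congr 1
  simp only [PySem.Dict.values, PySem.Dict.items_counter, List.map_map, List.countP_map]
  apply congrArg
  apply List.countP_congr
  intro y _
  simp [chars_count_single]

-- ===== VERDICT (by name: the statement is the Claim_ definition above) =====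
theorem check_sum_same_group_answer_spec : Claim_equal_check_sum_same_group_answer := by
  intro group_answers group_members _ _
  unfold Spec_check_sum_same_group_answer
  unfold check_sum_same_group_answer check_sum_same_group_answer_alt
  rw [PySem.List.enumerate_eq_map_pyRange group_answers "", List.foldl_map]
  congr 1
  funext sum_same i
  exact group_eq ((PySem.List.pyGetD group_answers i "").toList)
    (PySem.List.pyGetD group_members i 0) sum_same
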